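-- pv_equiv track=rewrite | github.com/simmran2003/ml_major | New_Db/89545097.py | min_steps_N
-- ===== SOURCE A (Python) =====
-- from bisect import insort
--
-- def min_steps_N(arr):
--
--     pri_q = []
--
--     ans = 0
--
--     for n in arr:
--
--         if pri_q:
--
--             if pri_q[-1] > n:
--
--                 ans += pri_q[-1] - n
--
--                 pri_q.pop()
--
--                 insort(pri_q, n)
--
--         insort(pri_q, n)
--
--     return ans
-- ===== SOURCE B (Python) =====
-- def min_steps_N(arr):
--     # Dynamic programming over candidate final values (the distinct input values,
--     # sorted): dp[j] = min cost to process the prefix with its last element set to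
--     # at most vals[j]; an optimal non-decreasing rewrite can always use input
--     # values, so the grid of distinct input values suffices.
--     if not arr:
--         return 0
--     vals = sorted(set(arr))
--     dp = [0] * len(vals)
--     for a in arr:
--         best = dp[0]
--         for j, v in enumerate(vals):
--             if dp[j] < best:
--                 best = dp[j]
--             dp[j] = best + abs(a - v)
--     return min(dp)
-- ===== Notes on version B (the rewrite author's own statement) =====
-- stated objective: alternative
-- what changed: Replaced A's greedy slope-trick loop (sorted-list priority queue, pop-max/reinsert, accumulating pops) by dynamic programming over the sorted distinct input values: dp[j] = min cost for the prefix with last element at most vals[j], updated with a running prefix minimum, answer = min(dp); correct because an optimal non-decreasing rewrite can always use input values.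
import Mathlib
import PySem

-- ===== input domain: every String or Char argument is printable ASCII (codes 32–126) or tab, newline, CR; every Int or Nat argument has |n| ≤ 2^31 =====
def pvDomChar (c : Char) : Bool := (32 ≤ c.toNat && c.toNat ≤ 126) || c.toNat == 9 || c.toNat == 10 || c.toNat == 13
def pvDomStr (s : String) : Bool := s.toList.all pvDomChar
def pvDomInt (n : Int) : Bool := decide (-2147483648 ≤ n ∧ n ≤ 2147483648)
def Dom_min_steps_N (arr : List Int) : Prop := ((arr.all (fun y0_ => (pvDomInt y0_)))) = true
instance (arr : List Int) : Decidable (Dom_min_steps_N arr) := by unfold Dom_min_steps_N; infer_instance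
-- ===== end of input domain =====

-- B replaces A's greedy slope-trick priority-queue loop by dynamic programming over the
-- sorted distinct input values (alternative algorithm, same return value, proved equal).

-- ===== PORT A =====
-- bisect.insort: insert n into sorted list s, after any equal elements
def insortA (s : List Int) (n : Int) : List Int :=
  match s with
  | [] => [n]
  | h :: t => if n < h then n :: h :: t else h :: insortA t n

-- the body of A's for-loop: `if pri_q:` + `pri_q[-1]` rendered as a match on getLast?
def stepA (st : List Int × Int) (n : Int) : List Int × Int :=
  let (q, ans) := st
  let (q, ans) :=
    match q.getLast? with
    | some m => if m > n then (insortA q.dropLast n, ans + (m - n)) else (q, ans)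
    | none => (q, ans)
  (insortA q n, ans)

def min_steps_N (arr : List Int) : Int :=
  (arr.foldl stepA ([], 0)).2

-- ===== PORT B =====
-- Source B's inner loop: walk dp and vals together, carrying the running best (prefix
-- minimum of the old dp), emitting the new dp entries
def innerB (a : Int) : Int → List Int → List Int → List Int
  | best, d :: ds, v :: vs =>
    let best' := if d < best then d else best
    (best' + |a - v|) :: innerB a best' ds vs
  | _, _, _ => []

def min_steps_N_alt (arr : List Int) : Int :=
  if arr = [] then 0
  else
    let vals := PySem.List.sorted (PySem.Set.ofList arr) (fun x => x) false
    let dp0 : List Int := List.replicate vals.length 0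
    let dpf := arr.foldl (fun dp a => innerB a (dp.headD 0) dp vals) dp0
    (PySem.List.min? dpf (fun x => x)).getD 0

-- ===== PRECONDITION & SPEC =====
def Spec_min_steps_N (arr : List Int) (out : Int) : Prop := out = min_steps_N_alt arr
instance (arr : List Int) (out : Int) : Decidable (Spec_min_steps_N arr out) := by unfold Spec_min_steps_N; infer_instance

-- ===== CLAIM (what is proved, stated in full; the proofs are below) =====
def Claim_equal_min_steps_N : Prop := ∀ (arr : List Int), Dom_min_steps_N arr → Spec_min_steps_N arr (min_steps_N arr)

-- ===== LEMMAS AND PROOFS =====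

-- Σ_{x∈q} max(x−v,0): the slope-trick potential of A's queue at threshold v
def SQ (q : List Int) (v : Int) : Int := (q.map (fun x => max (x - v) 0)).sum

theorem SQ_nil (v : Int) : SQ [] v = 0 := rfl

theorem SQ_cons (x : Int) (s : List Int) (v : Int) :
    SQ (x :: s) v = max (x - v) 0 + SQ s v := by simp [SQ]

theorem SQ_append (s t : List Int) (v : Int) : SQ (s ++ t) v = SQ s v + SQ t v := by
  simp [SQ]

theorem SQ_insort (s : List Int) (n v : Int) :
    SQ (insortA s n) v = max (n - v) 0 + SQ s v := by
  induction s with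
  | nil => simp [insortA, SQ_cons, SQ_nil]
  | cons h t ih =>
      simp only [insortA]
      split
      · simp [SQ_cons]
      · rw [SQ_cons, ih, SQ_cons]; ring

theorem SQ_anti (q : List Int) {u v : Int} (h : u ≤ v) : SQ q v ≤ SQ q u := by
  induction q with
  | nil => simp [SQ_nil]
  | cons x s ih =>
      rw [SQ_cons, SQ_cons]
      have h1 : max (x - v) 0 ≤ max (x - u) 0 := by omega
      omega

theorem SQ_zero (q : List Int) (v : Int) (h : ∀ x ∈ q, x ≤ v) : SQ q v = 0 := by
  induction q with
  | nil => rfl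
  | cons x s ih =>
      rw [SQ_cons, ih (fun y hy => h y (List.mem_cons_of_mem x hy))]
      have := h x List.mem_cons_self
      omega

theorem mem_insortA (s : List Int) (n x : Int) (hx : x ∈ insortA s n) : x = n ∨ x ∈ s := by
  induction s with
  | nil => simpa [insortA] using hx
  | cons h t ih =>
      simp only [insortA] at hx
      split at hx
      · simpa using hx
      · rcases List.mem_cons.1 hx with hx | hx
        · simp [hx]
        · rcases ih hx with hx | hx
          · exact Or.inl hx
          · exact Or.inr (List.mem_cons_of_mem h hx)

theorem sorted_insortA (s : List Int) (n : Int) (hs : List.Pairwise (· ≤ ·) s) :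
    List.Pairwise (· ≤ ·) (insortA s n) := by
  induction s with
  | nil => simp [insortA]
  | cons h t ih =>
      rw [List.pairwise_cons] at hs
      obtain ⟨hh, ht⟩ := hs
      simp only [insortA]
      split
      · rename_i hn
        refine List.pairwise_cons.2 ⟨?_, List.pairwise_cons.2 ⟨hh, ht⟩⟩
        intro y hy
        simp only [List.mem_cons] at hy
        rcases hy with hy | hy
        · exact hy ▸ hn.le
        · exact hn.le.trans (hh _ hy)
      · rename_i hn
        rw [not_lt] at hn
        refine List.pairwise_cons.2 ⟨?_, ih ht⟩
        intro y hy
        rcases mem_insortA t n y hy with hy | hy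
        · exact hy ▸ hn
        · exact hh _ hy

theorem sorted_le_last (init : List Int) (m : Int)
    (hs : List.Pairwise (· ≤ ·) (init ++ [m])) : ∀ x ∈ init, x ≤ m := by
  rw [List.pairwise_append] at hs
  intro x hx
  exact hs.2.2 x hx m (by simp)

-- the per-round invariant linking B's dp list to a cost function G on the value grid:
-- walking dp with the running minimum (started at b) yields exactly G at each grid point
def DInv (G : Int → Int) : Int → List Int → List Int → Prop
  | _, [], [] => True
  | b, d :: ds, v :: vs => min b d = G v ∧ DInv G (min b d) ds vs
  | _, _, _ => False

-- the inner dp pass: if old prefix minima follow G, the new ones follow G', for any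
-- G' that is below G+|a−·|, antitone, and tight at each grid step (h3)
theorem inner_go (a : Int) (G G' : Int → Int) (S : List Int)
    (h1 : ∀ v, G' v ≤ G v + |a - v|)
    (h2 : ∀ u v : Int, u ≤ v → G' v ≤ G' u)
    (h3 : ∀ u v : Int, u ≤ v → (∀ x ∈ S, x < v → x ≤ u) →
        G' v = G v + |a - v| ∨ G' v = G' u) :
    ∀ (vs ds : List Int) (b nb u : Int),
      DInv G b ds vs → nb = G' u → (∀ x ∈ vs, u ≤ x) →
      (∀ x ∈ S, x ≤ u ∨ x ∈ vs) → vs.Pairwise (· < ·) →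
      DInv G' nb (innerB a b ds vs) vs := by
  intro vs
  induction vs with
  | nil =>
      intro ds b nb u hd _ _ _ _
      cases ds with
      | nil => simp [innerB, DInv]
      | cons d ds => exact absurd hd (by simp [DInv])
  | cons v vs ih =>
      intro ds b nb u hd hnb hu hcov hsorted
      cases ds with
      | nil => exact absurd hd (by simp [DInv])
      | cons d ds =>
        obtain ⟨hhead, htail⟩ := hd
        have hbm : (if d < b then d else b) = min b d := by split <;> omega
        have huv : u ≤ v := hu v List.mem_cons_self
        have hgap : ∀ x ∈ S, x < v → x ≤ u := by
          intro x hx hxv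
          rcases hcov x hx with h | h
          · exact h
          · rcases List.mem_cons.1 h with h | h
            · omega
            · have := (List.pairwise_cons.1 hsorted).1 x h
              omega
        have hkey : min nb (G v + |a - v|) = G' v := by
          rw [hnb]
          rcases h3 u v huv hgap with h | h
          · have := h2 u v huv
            omega
          · have := h1 v
            omega
        simp only [innerB, hbm, DInv, hhead]
        refine ⟨hkey, ?_⟩
        rw [hkey]
        rw [hhead] at htail
        refine ih ds (G v) (G' v) v htail rfl ?_ ?_
          (List.pairwise_cons.1 hsorted).2
        · intro x hx
          exact le_of_lt ((List.pairwise_cons.1 hsorted).1 x hx)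
        · intro x hx
          rcases hcov x hx with h | h
          · exact Or.inl (h.trans huv)
          · rcases List.mem_cons.1 h with h | h
            · exact Or.inl h.le
            · exact Or.inr h

-- the three pointwise facts needed by inner_go, no-pop case (all of q is ≤ a)
theorem nopopFacts (a ans : Int) (q : List Int) (hmax : ∀ x ∈ q, x ≤ a) :
    (∀ v, ans + SQ (insortA q a) v ≤ (ans + SQ q v) + |a - v|) ∧
    (∀ u v : Int, u ≤ v → ans + SQ (insortA q a) v ≤ ans + SQ (insortA q a) u) ∧
    (∀ u v : Int, u ≤ v → (∀ x ∈ a :: q, x < v → x ≤ u) →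
      ans + SQ (insortA q a) v = (ans + SQ q v) + |a - v| ∨
      ans + SQ (insortA q a) v = ans + SQ (insortA q a) u) ∧
    (∀ v, v ≤ a → ans + SQ (insortA q a) v = (ans + SQ q v) + |a - v|) := by
  have h4 : ∀ v, v ≤ a → ans + SQ (insortA q a) v = (ans + SQ q v) + |a - v| := by
    intro v hv
    have habs : |a - v| = a - v := abs_of_nonneg (by omega)
    rw [SQ_insort, habs]; omega
  refine ⟨?_, ?_, ?_, h4⟩
  · intro v
    have h1 := le_abs_self (a - v)
    have h2 := abs_nonneg (a - v)
    rw [SQ_insort]; omega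
  · intro u v huv
    have := SQ_anti q huv
    rw [SQ_insort, SQ_insort]; omega
  · intro u v huv hgap
    by_cases hva : v ≤ a
    · exact Or.inl (h4 v hva)
    · right
      have hau : a ≤ u := hgap a List.mem_cons_self (by omega)
      have hz : ∀ w, u ≤ w → SQ (insortA q a) w = 0 := by
        intro w hw
        refine SQ_zero _ _ (fun x hx => ?_)
        rcases mem_insortA q a x hx with h | h
        · omega
        · have := hmax x h; omega
      rw [hz v (by omega), hz u le_rfl]

-- the three pointwise facts needed by inner_go, pop case (a < m = max of q = init ++ [m])
theorem popFacts (a m ans : Int) (init : List Int) (ham : a < m)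
    (hinit : ∀ x ∈ init, x ≤ m) :
    (∀ v, (ans + (m - a)) + SQ (insortA (insortA init a) a) v ≤
        (ans + SQ (init ++ [m]) v) + |a - v|) ∧
    (∀ u v : Int, u ≤ v → (ans + (m - a)) + SQ (insortA (insortA init a) a) v ≤
        (ans + (m - a)) + SQ (insortA (insortA init a) a) u) ∧
    (∀ u v : Int, u ≤ v → (∀ x ∈ a :: (init ++ [m]), x < v → x ≤ u) →
      (ans + (m - a)) + SQ (insortA (insortA init a) a) v = (ans + SQ (init ++ [m]) v) + |a - v| ∨
      (ans + (m - a)) + SQ (insortA (insortA init a) a) v =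
        (ans + (m - a)) + SQ (insortA (insortA init a) a) u) ∧
    (∀ v, v ≤ a → (ans + (m - a)) + SQ (insortA (insortA init a) a) v =
        (ans + SQ (init ++ [m]) v) + |a - v|) := by
  have hexp : ∀ v, SQ (insortA (insortA init a) a) v =
      max (a - v) 0 + (max (a - v) 0 + SQ init v) := by
    intro v; rw [SQ_insort, SQ_insort]
  have hexp2 : ∀ v, SQ (init ++ [m]) v = SQ init v + max (m - v) 0 := by
    intro v; rw [SQ_append, SQ_cons, SQ_nil]; omega
  have h4 : ∀ v, v ≤ a → (ans + (m - a)) + SQ (insortA (insortA init a) a) v =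
      (ans + SQ (init ++ [m]) v) + |a - v| := by
    intro v hv
    have habs : |a - v| = a - v := abs_of_nonneg (by omega)
    rw [hexp, hexp2, habs]; omega
  refine ⟨?_, ?_, ?_, h4⟩
  · intro v
    have h1 := le_abs_self (a - v)
    have h2 := neg_abs_le (a - v)
    rw [hexp, hexp2]; omega
  · intro u v huv
    have := SQ_anti init huv
    rw [hexp, hexp]; omega
  · intro u v huv hgap
    by_cases hva : v ≤ a
    · exact Or.inl (h4 v hva)
    · by_cases hvm : v ≤ m
      · left
        have habs : |a - v| = v - a := by rw [abs_sub_comm]; exact abs_of_nonneg (by omega)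
        rw [hexp, hexp2, habs]; omega
      · right
        have hau : a ≤ u := hgap a List.mem_cons_self (by omega)
        have hmu : m ≤ u := hgap m (by simp) (by omega)
        have hz : ∀ w, u ≤ w → SQ (insortA (insortA init a) a) w = 0 := by
          intro w hw
          refine SQ_zero _ _ (fun x hx => ?_)
          rcases mem_insortA _ a x hx with h | h
          · omega
          · rcases mem_insortA init a x h with h | h
            · omega
            · have := hinit x h; omega
        rw [hz v (by omega), hz u le_rfl]

-- head handling of one inner pass: feed inner_go with u = the least grid value
theorem finishB (a v0 : Int) (vt : List Int) (hV : (v0 :: vt).Pairwise (· < ·))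
    (hv0a : v0 ≤ a) (G G' : Int → Int) (S : List Int)
    (h1 : ∀ v, G' v ≤ G v + |a - v|)
    (h2 : ∀ u v : Int, u ≤ v → G' v ≤ G' u)
    (h3 : ∀ u v : Int, u ≤ v → (∀ x ∈ S, x < v → x ≤ u) →
        G' v = G v + |a - v| ∨ G' v = G' u)
    (h4 : ∀ v, v ≤ a → G' v = G v + |a - v|)
    (hS : ∀ x ∈ S, x ∈ v0 :: vt)
    (d : Int) (ds : List Int) (hd : DInv G ((d :: ds).headD 0) (d :: ds) (v0 :: vt)) :
    DInv G' ((innerB a ((d :: ds).headD 0) (d :: ds) (v0 :: vt)).headD 0)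
      (innerB a ((d :: ds).headD 0) (d :: ds) (v0 :: vt)) (v0 :: vt) := by
  have hdd : d = G v0 := by
    have := hd.1; simpa using this
  have hout : innerB a d (d :: ds) (v0 :: vt) =
      (d + |a - v0|) :: innerB a d ds vt := by
    simp [innerB]
  have hnb : d + |a - v0| = G' v0 := by rw [h4 v0 hv0a, ← hdd]
  have hu : ∀ x ∈ v0 :: vt, v0 ≤ x := by
    intro x hx
    rcases List.mem_cons.1 hx with h | h
    · omega
    · exact ((List.pairwise_cons.1 hV).1 x h).le
  have hres := inner_go a G G' S h1 h2 h3 (v0 :: vt) (d :: ds) d (d + |a - v0|) v0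
    hd hnb hu (fun x hx => Or.inr (hS x hx)) hV
  show DInv G' ((innerB a d (d :: ds) (v0 :: vt)).headD 0)
      (innerB a d (d :: ds) (v0 :: vt)) (v0 :: vt)
  rw [hout] at hres ⊢
  simpa using hres

-- one round: A\'s step on (q, ans) and B\'s inner dp pass preserve the joint invariant
theorem roundStep (V : List Int) (hV : V.Pairwise (· < ·))
    (a : Int) (ha : a ∈ V) (q : List Int) (ans : Int) (dp : List Int)
    (hq : q.Pairwise (· ≤ ·)) (hqV : ∀ x ∈ q, x ∈ V)
    (hd : DInv (fun v => ans + SQ q v) (dp.headD 0) dp V) :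
    (stepA (q, ans) a).1.Pairwise (· ≤ ·) ∧ (∀ x ∈ (stepA (q, ans) a).1, x ∈ V) ∧
    DInv (fun v => (stepA (q, ans) a).2 + SQ (stepA (q, ans) a).1 v)
      ((innerB a (dp.headD 0) dp V).headD 0) (innerB a (dp.headD 0) dp V) V := by
  obtain ⟨v0, vt, hVe⟩ : ∃ v0 vt, V = v0 :: vt := by
    cases V with
    | nil => simp at ha
    | cons v0 vt => exact ⟨v0, vt, rfl⟩
  subst hVe
  have hv0a : v0 ≤ a := by
    rcases List.mem_cons.1 ha with h | h
    · omega
    · exact ((List.pairwise_cons.1 hV).1 a h).le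
  obtain ⟨d, ds, hdpe⟩ : ∃ d ds, dp = d :: ds := by
    cases dp with
    | nil => exact absurd hd (by simp [DInv])
    | cons d ds => exact ⟨d, ds, rfl⟩
  subst hdpe
  rcases hlast : q.getLast? with _ | m
  · -- q is empty
    have hq0 : q = [] := List.getLast?_eq_none_iff.1 hlast
    subst hq0
    have hstep : stepA ([], ans) a = (insortA [] a, ans) := by simp [stepA]
    rw [hstep]
    obtain ⟨f1, f2, f3, f4⟩ := nopopFacts a ans [] (by simp)
    refine ⟨sorted_insortA [] a (by simp), ?_, ?_⟩
    · intro x hx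
      rcases mem_insortA [] a x hx with h | h
      · exact h ▸ ha
      · simp at h
    · exact finishB a v0 vt hV hv0a _ _ (a :: []) f1 f2 f3 f4
        (by intro x hx; rcases List.mem_cons.1 hx with h | h
            · exact h ▸ ha
            · simp at h) d ds hd
  · obtain ⟨init, hqe⟩ := List.getLast?_eq_some_iff.1 hlast
    subst hqe
    have hinit : ∀ x ∈ init, x ≤ m := sorted_le_last init m hq
    have hinitm : ∀ x ∈ init ++ [m], x ≤ m := by
      intro x hx
      rcases List.mem_append.1 hx with h | h
      · exact hinit x h
      · simp at h; omega
    by_cases hma : m > a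
    · -- pop case
      have hstep : stepA (init ++ [m], ans) a =
          (insortA (insortA init a) a, ans + (m - a)) := by
        simp [stepA, hlast, hma]
      rw [hstep]
      obtain ⟨f1, f2, f3, f4⟩ := popFacts a m ans init (by omega) hinit
      have hmemW : ∀ x ∈ insortA (insortA init a) a, x ∈ v0 :: vt := by
        intro x hx
        rcases mem_insortA _ a x hx with h | h
        · exact h ▸ ha
        · rcases mem_insortA init a x h with h | h
          · exact h ▸ ha
          · exact hqV x (List.mem_append_left [m] h)
      have hsortedinit : init.Pairwise (· ≤ ·) := (List.pairwise_append.1 hq).1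
      refine ⟨sorted_insortA _ a (sorted_insortA init a hsortedinit), hmemW, ?_⟩
      exact finishB a v0 vt hV hv0a _ _ (a :: (init ++ [m])) f1 f2 f3 f4
        (by intro x hx
            rcases List.mem_cons.1 hx with h | h
            · exact h ▸ ha
            · exact hqV x h) d ds hd
    · -- no pop
      have hstep : stepA (init ++ [m], ans) a = (insortA (init ++ [m]) a, ans) := by
        simp [stepA, hlast, hma]
      rw [hstep]
      obtain ⟨f1, f2, f3, f4⟩ := nopopFacts a ans (init ++ [m])
        (fun x hx => le_trans (hinitm x hx) (by omega))
      refine ⟨sorted_insortA _ a hq, ?_, ?_⟩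
      · intro x hx
        rcases mem_insortA _ a x hx with h | h
        · exact h ▸ ha
        · exact hqV x h
      · exact finishB a v0 vt hV hv0a _ _ (a :: (init ++ [m])) f1 f2 f3 f4
          (by intro x hx
              rcases List.mem_cons.1 hx with h | h
              · exact h ▸ ha
              · exact hqV x h) d ds hd

-- the whole fold: the invariant carried over the input list
theorem outerLoop (V : List Int) (hV : V.Pairwise (· < ·)) :
    ∀ (r q : List Int) (ans : Int) (dp : List Int),
      (∀ x ∈ r, x ∈ V) → q.Pairwise (· ≤ ·) → (∀ x ∈ q, x ∈ V) →
      DInv (fun v => ans + SQ q v) (dp.headD 0) dp V →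
      (r.foldl stepA (q, ans)).1.Pairwise (· ≤ ·) ∧
      (∀ x ∈ (r.foldl stepA (q, ans)).1, x ∈ V) ∧
      DInv (fun v => (r.foldl stepA (q, ans)).2 + SQ (r.foldl stepA (q, ans)).1 v)
        ((r.foldl (fun dp a => innerB a (dp.headD 0) dp V) dp).headD 0)
        (r.foldl (fun dp a => innerB a (dp.headD 0) dp V) dp) V := by
  intro r
  induction r with
  | nil => intro q ans dp _ hq hqV hd; exact ⟨hq, hqV, hd⟩
  | cons a r ih =>
    intro q ans dp hr hq hqV hd
    obtain ⟨g1, g2, g3⟩ := roundStep V hV a (hr a List.mem_cons_self) q ans dp hq hqV hd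
    have := ih (stepA (q, ans) a).1 (stepA (q, ans) a).2
      (innerB a (dp.headD 0) dp V)
      (fun x hx => hr x (List.mem_cons_of_mem a hx)) g1 g2 g3
    simpa using this

-- initial dp of zeros satisfies the invariant for the empty queue
theorem dinv_init : ∀ (vs : List Int),
    DInv (fun v => 0 + SQ ([] : List Int) v) 0 (List.replicate vs.length 0) vs := by
  intro vs
  induction vs with
  | nil => simp [DInv]
  | cons v vt ih =>
      refine ⟨by simp [SQ_nil], ?_⟩
      simpa using ih

-- folding min over a dp list satisfying the invariant lands on G at the last grid value
theorem dinv_foldl_min (G : Int → Int) :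
    ∀ (vs ds : List Int) (b w : Int), DInv G b ds vs → vs.getLast? = some w →
      ds.foldl min b = G w := by
  intro vs
  induction vs with
  | nil => intro ds b w _ hw; simp at hw
  | cons v vt ih =>
    intro ds b w hd hw
    cases ds with
    | nil => exact absurd hd (by simp [DInv])
    | cons d ds =>
      obtain ⟨hhead, htail⟩ := hd
      cases vt with
      | nil =>
          cases ds with
          | nil =>
              simp only [List.getLast?_singleton, Option.some.injEq] at hw
              simp [List.foldl, hhead, hw]
          | cons d2 ds2 => exact absurd htail (by simp [DInv])
      | cons v2 vt2 =>
          rw [List.getLast?_cons_cons] at hw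
          rw [List.foldl_cons]
          exact ih ds (min b d) w htail hw

-- every member of a strictly sorted list is at most its last element
theorem mem_le_getLast : ∀ (V : List Int), V.Pairwise (· < ·) → ∀ w, V.getLast? = some w →
    ∀ x ∈ V, x ≤ w := by
  intro V
  induction V with
  | nil => intro _ w hw; simp at hw
  | cons v vt ih =>
    intro hV w hw x hx
    cases vt with
    | nil =>
        simp only [List.getLast?_singleton, Option.some.injEq] at hw
        simp only [List.mem_singleton] at hx
        omega
    | cons v2 vt2 =>
        rw [List.getLast?_cons_cons] at hw
        have hwmem : w ∈ v2 :: vt2 := by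
          have := List.mem_of_getLast? (l := v2 :: vt2) (a := w) hw
          exact this
        rcases List.mem_cons.1 hx with h | h
        · have := (List.pairwise_cons.1 hV).1 w hwmem
          omega
        · exact ih (List.pairwise_cons.1 hV).2 w hw x h

-- ===== VERDICT (by name: the statement is the Claim_ definition above) =====
theorem min_steps_N_spec : Claim_equal_min_steps_N := by
  intro arr _
  unfold Spec_min_steps_N min_steps_N min_steps_N_alt
  by_cases harr : arr = []
  · subst harr; simp
  · rw [if_neg harr]
    have hV : (PySem.List.sorted (PySem.Set.ofList arr) (fun x => x) false).Pairwise (· < ·) :=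
      PySem.List.sorted_ofList_pairwise_lt arr
    set V := PySem.List.sorted (PySem.Set.ofList arr) (fun x => x) false with hVdef
    have hmem : ∀ x ∈ arr, x ∈ V := by
      intro x hx
      rw [hVdef, PySem.List.mem_sorted]
      exact (PySem.Set.mem_ofList arr x).2 hx
    have hh : (List.replicate V.length (0 : Int)).headD 0 = 0 := by
      cases V <;> simp [List.replicate_succ]
    obtain ⟨g1, g2, g3⟩ := outerLoop V hV arr [] 0 (List.replicate V.length 0) hmem
      (by simp) (by simp) (by rw [hh]; exact dinv_init V)
    obtain ⟨x0, t0, harre⟩ : ∃ x0 t0, arr = x0 :: t0 := by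
      cases arr with
      | nil => exact absurd rfl harr
      | cons x0 t0 => exact ⟨x0, t0, rfl⟩
    have hx0V : x0 ∈ V := hmem x0 (by rw [harre]; exact List.mem_cons_self)
    obtain ⟨w, hw⟩ : ∃ w, V.getLast? = some w := by
      cases hVl : V.getLast? with
      | none =>
          have : V = [] := List.getLast?_eq_none_iff.1 hVl
          rw [this] at hx0V; simp at hx0V
      | some w => exact ⟨w, rfl⟩
    set dpf := arr.foldl (fun dp a => innerB a (dp.headD 0) dp V) (List.replicate V.length 0)
      with hdpf
    obtain ⟨o, rest, hdpfe⟩ : ∃ o rest, dpf = o :: rest := by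
      cases hdc : dpf with
      | nil =>
          rw [hdc] at g3
          cases hVc : V with
          | nil => rw [hVc] at hx0V; simp at hx0V
          | cons v vt => rw [hVc] at g3; exact absurd g3 (by simp [DInv])
      | cons o rest => exact ⟨o, rest, rfl⟩
    have hfold := dinv_foldl_min _ V dpf (dpf.headD 0) w g3 hw
    rw [hdpfe] at hfold
    simp only [List.headD_cons, List.foldl_cons, min_self] at hfold
    have hz : SQ (arr.foldl stepA ([], 0)).1 w = 0 :=
      SQ_zero _ _ (fun x hx => mem_le_getLast V hV w hw x (g2 x hx))
    show (arr.foldl stepA ([], 0)).2 = (PySem.List.min? dpf (fun x => x)).getD 0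
    rw [hdpfe, PySem.List.min?_id_cons]
    simp only [Option.getD_some]
    rw [hfold]
    omega
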